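-- pv_equiv track=rewrite | github.com/gaurav-av-14/Python_MOOC | oldest_person.py | oldest_person
-- ===== SOURCE A (Python) =====
-- def oldest_person(people: list):
--     yr = people[0][1]
--     name = people[0][0]
--     for i in range(len(people)):
--         if people[i][1]<yr:
--             yr = people[i][1]
--             name = people[i][0]
--     return name
-- ===== SOURCE B (Python) =====
-- def oldest_person(people: list):
--     # Stable sort by birth year; first element is the earliest-listed person
--     # with the minimum birth year (same tie behaviour as a strict-< scan).
--     return sorted(people, key=lambda p: p[1])[0][0]
-- ===== Notes on version B (the rewrite author's own statement) =====
-- stated objective: idiomatic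
-- what changed: Replaces the index-based running-minimum loop with a one-line stable sort by birth year followed by taking the first element; stability preserves A's first-wins tie behaviour.
import Mathlib
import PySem

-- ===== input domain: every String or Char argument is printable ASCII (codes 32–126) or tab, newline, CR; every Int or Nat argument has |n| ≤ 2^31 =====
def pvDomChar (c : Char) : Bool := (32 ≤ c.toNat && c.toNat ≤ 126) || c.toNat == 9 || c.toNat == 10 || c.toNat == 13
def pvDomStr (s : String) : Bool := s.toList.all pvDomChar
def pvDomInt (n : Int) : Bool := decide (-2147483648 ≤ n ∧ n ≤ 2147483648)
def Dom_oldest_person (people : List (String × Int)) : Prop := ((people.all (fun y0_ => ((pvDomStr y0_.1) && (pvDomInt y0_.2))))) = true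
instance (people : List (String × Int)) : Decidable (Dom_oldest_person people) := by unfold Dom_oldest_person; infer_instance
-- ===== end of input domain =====

-- B replaces A's index-based running-minimum loop by a stable sort on birth
-- year followed by taking the first element (idiomatic; same tie behaviour).
-- Both raise IndexError on the empty list, excluded by Pre_.

-- ===== PORT A =====
def oldest_person (people : List (String × Int)) : String :=
  let yr : Int := (PySem.List.pyGetD people 0 ("", 0)).2
  let name : String := (PySem.List.pyGetD people 0 ("", 0)).1
  let st := (PySem.List.pyRange 0 (people.length : Int) 1).foldl
    (fun (s : String × Int) i =>
      let p := PySem.List.pyGetD people i ("", 0)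
      if p.2 < s.2 then (p.1, p.2) else s) (name, yr)
  st.1

-- ===== PORT B =====
def oldest_person_alt (people : List (String × Int)) : String :=
  ((PySem.List.sorted people (fun p => p.2) false).headD ("", 0)).1

-- ===== PRECONDITION & SPEC =====
-- Pre_ excludes exactly the empty list, on which both Pythons raise IndexError.
def Pre_oldest_person (people : List (String × Int)) : Prop := people ≠ []
instance (people : List (String × Int)) : Decidable (Pre_oldest_person people) := by
  unfold Pre_oldest_person; infer_instance
def pvWitness_oldest_person : (List (String × Int)) := [("ada", 1815), ("alan", 1912)]
def Spec_oldest_person (people : List (String × Int)) (out : String) : Prop := out = oldest_person_alt people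
instance (people : List (String × Int)) (out : String) : Decidable (Spec_oldest_person people out) := by unfold Spec_oldest_person; infer_instance

-- ===== CLAIM (what is proved, stated in full; the proofs are below) =====
def Claim_equal_oldest_person : Prop := ∀ (people : List (String × Int)), Dom_oldest_person people → Pre_oldest_person people → Spec_oldest_person people (oldest_person people)

-- ===== LEMMAS AND PROOFS =====

-- A's loop body / the "first minimum" fold both ports reduce to.
def pvStep (b p : String × Int) : String × Int := if p.2 < b.2 then p else b

theorem insertBy_cons (before : (String × Int) → (String × Int) → Bool)
    (x h : String × Int) (t : List (String × Int)) :
    PySem.List.insertBy before x (h :: t) =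
      if before x h then x :: h :: t else h :: PySem.List.insertBy before x t := rfl

-- head of the insertion-sort fold tracks the strict-< running minimum
theorem head_foldl_insertBy (ps : List (String × Int)) (h : String × Int)
    (t : List (String × Int)) :
    ((ps.foldl (fun acc x =>
        PySem.List.insertBy (fun a b => decide (a.2 < b.2)) x acc) (h :: t)).head?)
      = some (ps.foldl pvStep h) := by
  induction ps generalizing h t with
  | nil => simp
  | cons x ps ih =>
    simp only [List.foldl_cons, insertBy_cons, pvStep]
    by_cases hx : x.2 < h.2
    · simp only [hx, decide_true, if_true, ih]
    · simp only [hx, decide_false, Bool.false_eq_true, if_false, ih]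

theorem foldl_step_eta (ps : List (String × Int)) (b : String × Int) :
    ps.foldl (fun s p => if p.2 < s.2 then (p.1, p.2) else s) b = ps.foldl pvStep b := by
  induction ps generalizing b with
  | nil => rfl
  | cons p ps ih => simp only [List.foldl_cons, pvStep, ih]

-- ===== VERDICT (by name: the statement is the Claim_ definition above) =====
theorem oldest_person_spec : Claim_equal_oldest_person := by
  intro people _ hpre
  obtain ⟨p0, rest, rfl⟩ := List.exists_cons_of_ne_nil hpre
  unfold Spec_oldest_person oldest_person oldest_person_alt PySem.List.sorted
  simp only [if_false, Bool.false_eq_true]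
  rw [PySem.List.foldl_pyRange_zero_pyGetD' (p0 :: rest) ("", 0)
    (fun (s : String × Int) p => if p.2 < s.2 then (p.1, p.2) else s)]
  have hB := head_foldl_insertBy rest p0 []
  simp only [List.foldl_cons, PySem.List.insertBy, PySem.List.pyGetD_zero_cons,
    foldl_step_eta] at *
  simp [List.headD_eq_head?, hB]
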